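-- pv_equiv track=rewrite | github.com/AltivumInc-Admin/your6 | lambda/ai_personalizer.py | _add_military_terminology
-- ===== SOURCE A (Python) =====
-- def _add_military_terminology(text: str) -> str:
--     """Add appropriate military terminology"""
--     replacements = {
--         'understand': 'copy',
--         'okay': 'roger',
--         'friend': 'battle buddy',
--         'group': 'unit'
--     }
--
--     result = text
--     for civilian, military in replacements.items():
--         result = result.replace(civilian, military)
--
--     return result
-- ===== SOURCE B (Python) =====
-- def _add_military_terminology(text: str) -> str:
--     """Add appropriate military terminology (single left-to-right scan)."""
--     replacements = {
--         'understand': 'copy',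
--         'okay': 'roger',
--         'friend': 'battle buddy',
--         'group': 'unit'
--     }
--     out = []
--     i = 0
--     n = len(text)
--     while i < n:
--         for civilian, military in replacements.items():
--             if text.startswith(civilian, i):
--                 out.append(military)
--                 i += len(civilian)
--                 break
--         else:
--             out.append(text[i])
--             i += 1
--     return ''.join(out)
-- ===== Notes on version B (the rewrite author's own statement) =====
-- stated objective: alternative
-- what changed: A makes four sequential whole-string .replace passes; B makes one left-to-right scan that at each position matches any of the four keys and emits its replacement (valid because the keys are pairwise prefix-incomparable and no replacement value can create or contain a key occurrence).
import Mathlib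
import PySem

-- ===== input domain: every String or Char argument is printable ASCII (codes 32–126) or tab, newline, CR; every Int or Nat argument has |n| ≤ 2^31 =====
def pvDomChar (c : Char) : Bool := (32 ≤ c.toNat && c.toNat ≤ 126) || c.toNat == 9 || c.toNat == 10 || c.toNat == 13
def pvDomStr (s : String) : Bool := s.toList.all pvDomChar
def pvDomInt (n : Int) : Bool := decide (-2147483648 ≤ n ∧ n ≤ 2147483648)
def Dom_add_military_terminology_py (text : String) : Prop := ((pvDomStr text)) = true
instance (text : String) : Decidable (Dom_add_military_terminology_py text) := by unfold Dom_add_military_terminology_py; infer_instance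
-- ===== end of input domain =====

-- B replaces A's four sequential whole-string replace passes by a single left-to-right scan
-- that matches any of the four keys at each position (alternative decomposition, same cost).


-- ===== PORT A =====
-- literal port of A: a dict of four replacements, folded over with str.replace
def add_military_terminology_py (text : String) : String :=
  let replacements : List (String × String) :=
    [("understand", "copy"), ("okay", "roger"), ("friend", "battle buddy"), ("group", "unit")]
  replacements.foldl (fun result cm => PySem.Str.replace result cm.1 cm.2) text

-- ===== PORT B =====
-- B's replacement table as char lists (keys and values)
def undL : List Char := ['u','n','d','e','r','s','t','a','n','d']
def cpyL : List Char := ['c','o','p','y']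
def okyL : List Char := ['o','k','a','y']
def rgrL : List Char := ['r','o','g','e','r']
def frdL : List Char := ['f','r','i','e','n','d']
def bbL  : List Char := ['b','a','t','t','l','e',' ','b','u','d','d','y']
def grpL : List Char := ['g','r','o','u','p']
def untL : List Char := ['u','n','i','t']

-- single left-to-right scan: at each position try the four keys in table order,
-- emit the replacement and jump over the key, else copy one character
def scanRep : List Char → List Char
  | [] => []
  | c :: t =>
    if undL.isPrefixOf (c :: t) then cpyL ++ scanRep ((c :: t).drop undL.length)
    else if okyL.isPrefixOf (c :: t) then rgrL ++ scanRep ((c :: t).drop okyL.length)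
    else if frdL.isPrefixOf (c :: t) then bbL ++ scanRep ((c :: t).drop frdL.length)
    else if grpL.isPrefixOf (c :: t) then untL ++ scanRep ((c :: t).drop grpL.length)
    else c :: scanRep t
termination_by l => l.length
decreasing_by all_goals simp [undL, okyL, frdL, grpL]

def add_military_terminology_py_alt (text : String) : String :=
  String.ofList (scanRep text.toList)

-- ===== PRECONDITION & SPEC =====
def Spec_add_military_terminology_py (text : String) (out : String) : Prop := out = add_military_terminology_py_alt text
instance (text : String) (out : String) : Decidable (Spec_add_military_terminology_py text out) := by unfold Spec_add_military_terminology_py; infer_instance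

-- ===== CLAIM (what is proved, stated in full; the proofs are below) =====
def Claim_equal_add_military_terminology_py : Prop := ∀ (text : String), Dom_add_military_terminology_py text → Spec_add_military_terminology_py text (add_military_terminology_py text)

-- ===== LEMMAS AND PROOFS =====

-- a clean (fuel-free) recursion equivalent to PySem.Chars.replace for a nonempty pattern
def rep (old new : List Char) : List Char → List Char
  | [] => []
  | c :: t =>
    if old.isPrefixOf (c :: t) && !old.isEmpty then
      new ++ rep old new ((c :: t).drop old.length)
    else c :: rep old new t
termination_by l => l.length
decreasing_by
  · rename_i h
    simp only [Bool.and_eq_true, Bool.not_eq_true', List.isEmpty_eq_false_iff] at h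
    have : old.length ≠ 0 := by simpa [List.length_eq_zero_iff] using h.2
    simp; omega
  · simp

lemma go_eq_rep (old new : List Char) (ho : old ≠ []) :
    ∀ (fuel : Nat) (l acc : List Char), l.length ≤ fuel →
      PySem.Chars.replace.go old new fuel l acc = acc.reverse ++ rep old new l := by
  intro fuel
  induction fuel with
  | zero =>
    intro l acc hl
    have : l = [] := by simpa [List.length_eq_zero_iff] using Nat.le_zero.mp hl
    subst this
    simp [PySem.Chars.replace.go, rep]
  | succ n ih =>
    intro l acc hl
    match l with
    | [] => simp [PySem.Chars.replace.go, rep]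
    | c :: t =>
      rw [PySem.Chars.replace.go]
      by_cases hp : old.isPrefixOf (c :: t) = true
      · have hol : 1 ≤ old.length := by
          cases old with
          | nil => exact absurd rfl ho
          | cons a o => simp
        rw [if_pos hp, ih _ _ (by simp at hl ⊢; omega)]
        rw [rep, if_pos (by simp [hp, List.isEmpty_eq_false_iff, ho])]
        simp
      · rw [if_neg hp, ih _ _ (by simp at hl ⊢; omega)]
        rw [rep, if_neg (by simp [hp])]
        simp

lemma replace_eq_rep (l old new : List Char) (ho : old ≠ []) :
    PySem.Chars.replace l old new = rep old new l := by
  rw [PySem.Chars.replace]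
  rw [if_neg (by simpa [List.isEmpty_eq_false_iff] using ho)]
  simpa using go_eq_rep old new ho l.length l [] le_rfl

lemma prefix_concat {p w m : List Char} (h : p <+: w ++ m) : p <+: w ∨ w <+: p :=
  List.prefix_or_prefix_of_prefix h (List.prefix_append w m)

-- a block w in which the pattern old can never start passes through rep unchanged
lemma rep_pass (old new : List Char) :
    ∀ (w m : List Char),
      (∀ q ∈ w.tails, q ≠ [] → ¬ old <+: q ∧ ¬ q <+: old) →
      rep old new (w ++ m) = w ++ rep old new m := by
  intro w
  induction w with
  | nil => simp
  | cons a w' ih =>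
    intro m H
    have Hself := H (a :: w') ((List.mem_tails _ _).mpr List.suffix_rfl) (by simp)
    have hnp : ¬ old <+: (a :: w') ++ m := by
      intro hpre
      rcases prefix_concat hpre with h | h
      · exact Hself.1 h
      · exact Hself.2 h
    have hb : old.isPrefixOf (a :: (w' ++ m)) = false := by
      rw [Bool.eq_false_iff]
      intro hc
      exact hnp (by simpa using List.isPrefixOf_iff_prefix.mp hc)
    show rep old new (a :: (w' ++ m)) = a :: (w' ++ rep old new m)
    rw [rep, hb]
    simp only [Bool.false_and]
    rw [if_neg (by simp)]
    rw [ih m (fun q hq hne =>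
      H q ((List.mem_tails _ _).mpr (((List.mem_tails _ _).mp hq).trans (List.suffix_cons a w'))) hne)]

-- matching at the head of the string
lemma rep_head (old new m : List Char) (ho : old ≠ []) :
    rep old new (old ++ m) = new ++ rep old new m := by
  cases old with
  | nil => exact absurd rfl ho
  | cons a o =>
    show rep (a :: o) new (a :: (o ++ m)) = new ++ rep (a :: o) new m
    rw [rep]
    rw [if_pos (by simp [List.isPrefixOf_iff_prefix, List.prefix_append])]
    congr 1
    congr 1
    show (a :: o ++ m).drop (a :: o).length = m
    simp

-- a word p whose nonempty suffixes are prefix-incomparable with old and with new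
-- is a prefix of rep old new t exactly when it is a prefix of t
lemma rep_prefix_iff (old new : List Char) (ho : old ≠ []) :
    ∀ (n : Nat) (t : List Char), t.length ≤ n → ∀ (p : List Char),
      (∀ q ∈ p.tails, q ≠ [] → ¬ q <+: old ∧ ¬ old <+: q ∧ ¬ q <+: new ∧ ¬ new <+: q) →
      (p <+: rep old new t ↔ p <+: t) := by
  intro n
  induction n with
  | zero =>
    intro t ht p _
    have : t = [] := by simpa [List.length_eq_zero_iff] using Nat.le_zero.mp ht
    subst this
    simp [rep]
  | succ n ih =>
    intro t ht p H
    match t with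
    | [] => simp [rep]
    | c :: t' =>
      by_cases hp : old <+: (c :: t')
      · have hb : old.isPrefixOf (c :: t') = true := List.isPrefixOf_iff_prefix.mpr hp
        rw [rep, if_pos (by simp [hb, List.isEmpty_eq_false_iff, ho])]
        cases p with
        | nil => simp
        | cons d p' =>
          have Hself := H (d :: p') ((List.mem_tails _ _).mpr List.suffix_rfl) (by simp)
          constructor
          · intro hl
            exfalso
            rcases prefix_concat hl with h | h
            · exact Hself.2.2.1 h
            · exact Hself.2.2.2 h
          · intro hr
            exfalso
            rcases List.prefix_or_prefix_of_prefix hr hp with h | h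
            · exact Hself.1 h
            · exact Hself.2.1 h
      · have hb : old.isPrefixOf (c :: t') = false := by
          rw [Bool.eq_false_iff]; intro hc; exact hp (List.isPrefixOf_iff_prefix.mp hc)
        rw [rep, hb]
        simp only [Bool.false_and]
        rw [if_neg (by simp)]
        cases p with
        | nil => simp
        | cons d p' =>
          have hih := ih t' (by simp at ht; omega) p'
            (fun q hq hne =>
              H q ((List.mem_tails _ _).mpr (((List.mem_tails _ _).mp hq).trans (List.suffix_cons d p'))) hne)
          simp [List.cons_prefix_cons, hih]

-- cons form used in the no-match step of the main induction
lemma rep_prefix_cons_iff (old new : List Char) (ho : old ≠ []) (x c : Char) (p t : List Char)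
    (H : ∀ q ∈ p.tails, q ≠ [] → ¬ q <+: old ∧ ¬ old <+: q ∧ ¬ q <+: new ∧ ¬ new <+: q) :
    ((x :: p) <+: c :: rep old new t ↔ (x :: p) <+: c :: t) := by
  simp [List.cons_prefix_cons, rep_prefix_iff old new ho t.length t le_rfl p H]

-- unfolding scanRep at each kind of position (the four keys start with four distinct
-- characters, so the branch tests settle by computation)
lemma scan_und (s : List Char) : scanRep (undL ++ s) = cpyL ++ scanRep s := by
  simp only [undL, List.cons_append]
  rw [scanRep]
  rw [if_pos (by simp [undL, List.isPrefixOf])]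
  simp [undL]

lemma scan_oky (s : List Char) : scanRep (okyL ++ s) = rgrL ++ scanRep s := by
  simp only [okyL, List.cons_append]
  rw [scanRep]
  rw [if_neg (by simp [undL, List.isPrefixOf])]
  rw [if_pos (by simp [okyL, List.isPrefixOf])]
  simp [okyL]

lemma scan_frd (s : List Char) : scanRep (frdL ++ s) = bbL ++ scanRep s := by
  simp only [frdL, List.cons_append]
  rw [scanRep]
  rw [if_neg (by simp [undL, List.isPrefixOf])]
  rw [if_neg (by simp [okyL, List.isPrefixOf])]
  rw [if_pos (by simp [frdL, List.isPrefixOf])]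
  simp [frdL]

lemma scan_grp (s : List Char) : scanRep (grpL ++ s) = untL ++ scanRep s := by
  simp only [grpL, List.cons_append]
  rw [scanRep]
  rw [if_neg (by simp [undL, List.isPrefixOf])]
  rw [if_neg (by simp [okyL, List.isPrefixOf])]
  rw [if_neg (by simp [frdL, List.isPrefixOf])]
  rw [if_pos (by simp [grpL, List.isPrefixOf])]
  simp [grpL]

lemma chain_eq : ∀ (n : Nat) (l : List Char), l.length ≤ n →
    rep grpL untL (rep frdL bbL (rep okyL rgrL (rep undL cpyL l))) = scanRep l := by
  intro n
  induction n with
  | zero =>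
    intro l hl
    have : l = [] := by simpa [List.length_eq_zero_iff] using Nat.le_zero.mp hl
    subst this
    simp [rep, scanRep]
  | succ n ih =>
    intro l hl
    match l with
    | [] => simp [rep, scanRep]
    | c :: t =>
      by_cases h1 : undL <+: (c :: t)
      · obtain ⟨s, hs⟩ := h1
        rw [← hs]
        rw [rep_head undL cpyL s (by simp [undL])]
        rw [rep_pass okyL rgrL cpyL _ (by decide)]
        rw [rep_pass frdL bbL cpyL _ (by decide)]
        rw [rep_pass grpL untL cpyL _ (by decide)]
        rw [scan_und]
        have hss : s.length ≤ n := by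
          have := congrArg List.length hs
          simp [undL] at this
          simp at hl
          omega
        rw [ih s hss]
      · by_cases h2 : okyL <+: (c :: t)
        · obtain ⟨s, hs⟩ := h2
          rw [← hs]
          rw [rep_pass undL cpyL okyL _ (by decide)]
          rw [rep_head okyL rgrL _ (by simp [okyL])]
          rw [rep_pass frdL bbL rgrL _ (by decide)]
          rw [rep_pass grpL untL rgrL _ (by decide)]
          rw [scan_oky]
          have hss : s.length ≤ n := by
            have := congrArg List.length hs
            simp [okyL] at this
            simp at hl
            omega
          rw [ih s hss]
        · by_cases h3 : frdL <+: (c :: t)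
          · obtain ⟨s, hs⟩ := h3
            rw [← hs]
            rw [rep_pass undL cpyL frdL _ (by decide)]
            rw [rep_pass okyL rgrL frdL _ (by decide)]
            rw [rep_head frdL bbL _ (by simp [frdL])]
            rw [rep_pass grpL untL bbL _ (by decide)]
            rw [scan_frd]
            have hss : s.length ≤ n := by
              have := congrArg List.length hs
              simp [frdL] at this
              simp at hl
              omega
            rw [ih s hss]
          · by_cases h4 : grpL <+: (c :: t)
            · obtain ⟨s, hs⟩ := h4
              rw [← hs]
              rw [rep_pass undL cpyL grpL _ (by decide)]
              rw [rep_pass okyL rgrL grpL _ (by decide)]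
              rw [rep_pass frdL bbL grpL _ (by decide)]
              rw [rep_head grpL untL _ (by simp [grpL])]
              rw [scan_grp]
              have hss : s.length ≤ n := by
                have := congrArg List.length hs
                simp [grpL] at this
                simp at hl
                omega
              rw [ih s hss]
            · -- no key matches at this position: all passes keep the head character
              have e1 : rep undL cpyL (c :: t) = c :: rep undL cpyL t := by
                rw [rep, if_neg (by
                  simp only [Bool.and_eq_true, not_and]
                  intro hb _
                  exact absurd (List.isPrefixOf_iff_prefix.mp hb) h1)]
              have e2 : rep okyL rgrL (c :: rep undL cpyL t) = c :: rep okyL rgrL (rep undL cpyL t) := by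
                rw [rep, if_neg (by
                  simp only [Bool.and_eq_true, not_and]
                  intro hb _
                  have h := List.isPrefixOf_iff_prefix.mp hb
                  rw [show okyL = 'o' :: ['k','a','y'] from rfl] at h
                  rw [rep_prefix_cons_iff undL cpyL (by simp [undL]) _ _ _ _ (by decide)] at h
                  exact absurd h h2)]
              have e3 : rep frdL bbL (c :: rep okyL rgrL (rep undL cpyL t)) =
                  c :: rep frdL bbL (rep okyL rgrL (rep undL cpyL t)) := by
                rw [rep, if_neg (by
                  simp only [Bool.and_eq_true, not_and]
                  intro hb _
                  have h := List.isPrefixOf_iff_prefix.mp hb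
                  rw [show frdL = 'f' :: ['r','i','e','n','d'] from rfl] at h
                  rw [rep_prefix_cons_iff okyL rgrL (by simp [okyL]) _ _ _ _ (by decide)] at h
                  rw [rep_prefix_cons_iff undL cpyL (by simp [undL]) _ _ _ _ (by decide)] at h
                  exact absurd h h3)]
              have e4 : rep grpL untL (c :: rep frdL bbL (rep okyL rgrL (rep undL cpyL t))) =
                  c :: rep grpL untL (rep frdL bbL (rep okyL rgrL (rep undL cpyL t))) := by
                rw [rep, if_neg (by
                  simp only [Bool.and_eq_true, not_and]
                  intro hb _
                  have h := List.isPrefixOf_iff_prefix.mp hb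
                  rw [show grpL = 'g' :: ['r','o','u','p'] from rfl] at h
                  rw [rep_prefix_cons_iff frdL bbL (by simp [frdL]) _ _ _ _ (by decide)] at h
                  rw [rep_prefix_cons_iff okyL rgrL (by simp [okyL]) _ _ _ _ (by decide)] at h
                  rw [rep_prefix_cons_iff undL cpyL (by simp [undL]) _ _ _ _ (by decide)] at h
                  exact absurd h h4)]
              rw [e1, e2, e3, e4]
              rw [scanRep]
              rw [if_neg (by intro hb; exact h1 (List.isPrefixOf_iff_prefix.mp hb))]
              rw [if_neg (by intro hb; exact h2 (List.isPrefixOf_iff_prefix.mp hb))]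
              rw [if_neg (by intro hb; exact h3 (List.isPrefixOf_iff_prefix.mp hb))]
              rw [if_neg (by intro hb; exact h4 (List.isPrefixOf_iff_prefix.mp hb))]
              rw [ih t (by simp at hl; omega)]

-- ===== VERDICT (by name: the statement is the Claim_ definition above) =====
theorem add_military_terminology_py_spec : Claim_equal_add_military_terminology_py := by
  intro text _
  unfold Spec_add_military_terminology_py add_military_terminology_py add_military_terminology_py_alt
  simp only [List.foldl]
  rw [show PySem.Str.replace = fun s old new => String.ofList (PySem.Chars.replace s.toList old.toList new.toList) from rfl]
  simp only [String.toList_ofList]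
  rw [replace_eq_rep _ _ _ (by decide), replace_eq_rep _ _ _ (by decide),
      replace_eq_rep _ _ _ (by decide), replace_eq_rep _ _ _ (by decide)]
  rw [show "understand".toList = undL from by decide, show "copy".toList = cpyL from by decide,
      show "okay".toList = okyL from by decide, show "roger".toList = rgrL from by decide,
      show "friend".toList = frdL from by decide, show "battle buddy".toList = bbL from by decide,
      show "group".toList = grpL from by decide, show "unit".toList = untL from by decide]
  rw [chain_eq text.toList.length text.toList le_rfl]
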